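-- pv_equiv track=rewrite | github.com/arai3456/PCCB | chapter01/ant.py | ant
-- ===== SOURCE A (Python) =====
-- def ant(L, n, x):
--   ant_max = 0
--   ant_min = 0
--   for i in range(n):
--     Left = x[i]
--     Right = L-x[i]
--     if Right > Left:
--       i_max = Right
--       i_min = Left
--     else:
--       i_max = Left
--       i_min = Right
--     ant_max = max(i_max, ant_max)
--     ant_min = max(i_min, ant_min)
--   return ant_max, ant_min
-- ===== SOURCE B (Python) =====
-- def ant(L, n, x):
--     # Sort the first n positions, then read both answers off the sorted order:
--     # the farthest distance from the extreme positions, the nearest distance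
--     # from the element found by binary search around the midpoint L/2.
--     s = sorted(x[:n]) if n > 0 else []
--     if not s:
--         return 0, 0
--     hi = max(0, s[-1], L - s[0])
--     a, b = 0, len(s)
--     while a < b:
--         m = (a + b) // 2
--         if 2 * s[m] <= L:
--             a = m + 1
--         else:
--             b = m
--     lo = 0
--     if a > 0:
--         lo = max(lo, s[a - 1])
--     if a < len(s):
--         lo = max(lo, L - s[a])
--     return hi, lo
-- ===== Notes on version B (the rewrite author's own statement) =====
-- stated objective: alternative
-- what changed: Instead of A's single pass that branches per element and maintains two running maxima, B sorts the first n positions and reads both answers off the sorted order: the farthest distance comes from the two extreme elements (max(0, s[-1], L - s[0])), and the nearest distance from a binary search for the partition point around L/2 (the element left of it gives distance to the left wall, the element at it distance to the right wall); correct because min(v, L-v) equals v on the sorted prefix with 2v <= L and L-v on the rest.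
import Mathlib
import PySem

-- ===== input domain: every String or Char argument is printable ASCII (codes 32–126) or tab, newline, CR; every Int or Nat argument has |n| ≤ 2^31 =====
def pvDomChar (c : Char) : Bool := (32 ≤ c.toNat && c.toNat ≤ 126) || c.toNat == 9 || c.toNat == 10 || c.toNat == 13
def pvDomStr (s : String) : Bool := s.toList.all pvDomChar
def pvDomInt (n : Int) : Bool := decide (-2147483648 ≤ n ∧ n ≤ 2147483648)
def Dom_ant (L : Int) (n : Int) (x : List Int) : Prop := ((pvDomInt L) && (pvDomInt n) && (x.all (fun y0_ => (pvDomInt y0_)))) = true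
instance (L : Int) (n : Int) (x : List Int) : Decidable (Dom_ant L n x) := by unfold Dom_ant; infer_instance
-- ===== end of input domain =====

-- B replaces A's branching single pass by sort + binary search: the farthest distance is read
-- off the sorted extremes, the nearest off the partition point around L/2 ('alternative').

-- ===== PORT A =====
def ant (L : Int) (n : Int) (x : List Int) : Int × Int :=
  (PySem.List.pyRange 0 n 1).foldl
    (fun (st : Int × Int) i =>
      let Left := PySem.List.pyGetD x i 0
      let Right := L - PySem.List.pyGetD x i 0
      let p := if Right > Left then (Right, Left) else (Left, Right)
      (max p.1 st.1, max p.2 st.2))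
    (0, 0)

-- ===== PORT B =====
-- Source B's while-loop binary search over the sorted list (state (a, b), returns the final a;
-- the loop-local 'm = (a + b) // 2' is inlined).
def antBSearch (L : Int) (s : List Int) (a b : Int) : Int :=
  if _h : a < b then
    if 2 * PySem.List.pyGetD s (PySem.Int.floordiv (a + b) 2) 0 ≤ L then
      antBSearch L s (PySem.Int.floordiv (a + b) 2 + 1) b
    else
      antBSearch L s a (PySem.Int.floordiv (a + b) 2)
  else a
termination_by (b - a).toNat
decreasing_by
  · have h2 : PySem.Int.floordiv (a + b) 2 = (a + b) / 2 := by
      simp [PySem.Int.floordiv, Int.fdiv_eq_ediv]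
    rw [h2]; omega
  · have h2 : PySem.Int.floordiv (a + b) 2 = (a + b) / 2 := by
      simp [PySem.Int.floordiv, Int.fdiv_eq_ediv]
    rw [h2]; omega

def ant_alt (L : Int) (n : Int) (x : List Int) : Int × Int :=
  let s := if n > 0 then PySem.List.sorted (PySem.List.slice x none (some n)) (fun v => v) else []
  if s = [] then (0, 0)
  else
    let hi := max 0 (max (PySem.List.pyGetD s (-1) 0) (L - PySem.List.pyGetD s 0 0))
    let a := antBSearch L s 0 (PySem.List.len s)
    let lo : Int := 0
    let lo := if a > 0 then max lo (PySem.List.pyGetD s (a - 1) 0) else lo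
    let lo := if a < PySem.List.len s then max lo (L - PySem.List.pyGetD s a 0) else lo
    (hi, lo)

-- ===== PRECONDITION & SPEC =====
-- A indexes x[i] for i in range(n): it raises IndexError when n exceeds len(x).
def Pre_ant (L : Int) (n : Int) (x : List Int) : Prop := n ≤ (x.length : Int)
instance (L : Int) (n : Int) (x : List Int) : Decidable (Pre_ant L n x) := by unfold Pre_ant; infer_instance

def pvWitness_ant : Int × Int × List Int := (10, 3, [2, 6, 7])

def Spec_ant (L : Int) (n : Int) (x : List Int) (out : Int × Int) : Prop := out = ant_alt L n x
instance (L : Int) (n : Int) (x : List Int) (out : Int × Int) : Decidable (Spec_ant L n x out) := by unfold Spec_ant; infer_instance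

-- ===== CLAIM (what is proved, stated in full; the proofs are below) =====
def Claim_equal_ant : Prop := ∀ (L : Int) (n : Int) (x : List Int), Dom_ant L n x → Pre_ant L n x → Spec_ant L n x (ant L n x)

-- ===== LEMMAS AND PROOFS =====

-- A's loop body, expressed on the element value, splits into two independent max-folds.
theorem loopA_split (L : Int) (xs : List Int) (a b : Int) :
    xs.foldl (fun (st : Int × Int) v =>
        let p := if L - v > v then (L - v, v) else (v, L - v)
        (max p.1 st.1, max p.2 st.2)) (a, b)
      = (xs.foldl (fun m v => max (max v (L - v)) m) a,
         xs.foldl (fun m v => max (min v (L - v)) m) b) := by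
  induction xs generalizing a b with
  | nil => rfl
  | cons v t ih =>
    simp only [List.foldl_cons]
    rw [show (let p := if L - v > v then (L - v, v) else (v, L - v);
          ((max p.1 a, max p.2 b) : Int × Int)) = (max (max v (L - v)) a, max (min v (L - v)) b) by
        split <;> simp only [Prod.mk.injEq] <;> constructor <;> omega]
    exact ih _ _

-- A's index loop over range(n) is the structural fold over x[:n].
theorem ant_eq_fold (L n : Int) (x : List Int) (h0 : 0 < n) (hlen : n ≤ (x.length : Int)) :
    ant L n x = (x.take n.toNat).foldl (fun (st : Int × Int) v =>
        let p := if L - v > v then (L - v, v) else (v, L - v)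
        (max p.1 st.1, max p.2 st.2)) (0, 0) := by
  unfold ant
  have hlen2 : PySem.List.len (x.take n.toNat) = n := by
    rw [PySem.List.len_eq]
    simp [List.length_take]
    omega
  have key := PySem.List.foldl_pyRange_zero_pyGetD (x.take n.toNat) 0
    (fun (st : Int × Int) v =>
      let p := if L - v > v then (L - v, v) else (v, L - v)
      (max p.1 st.1, max p.2 st.2)) (0, 0)
  rw [hlen2] at key
  rw [← key]
  refine PySem.List.foldl_congr_mem _ _ _ _ ?_
  intro acc i hi
  have hmem := (PySem.List.mem_pyRange_one).1 hi
  have h1 : PySem.List.pyGetD x i 0 = PySem.List.pyGetD (x.take n.toNat) i 0 := by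
    rw [PySem.List.pyGetD_eq_getElem x 0 hmem.1 (by omega),
        PySem.List.pyGetD_eq_getElem (x.take n.toNat) 0 hmem.1 (by simp [List.length_take]; omega)]
    exact (List.getElem_take).symm
  simp only [h1]

-- max-fold toolbox: the fold of 'max (h v) ·' is the least upper bound of the seed and h-values.
theorem seed_le_foldlmax (h : Int → Int) (s : List Int) : ∀ c : Int, c ≤ s.foldl (fun m v => max (h v) m) c := by
  induction s with
  | nil => intro c; exact le_refl c
  | cons w t ih =>
    intro c
    simp only [List.foldl_cons]
    exact le_trans (le_max_right (h w) c) (ih _)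

theorem mem_le_foldlmax (h : Int → Int) (s : List Int) : ∀ (c v : Int), v ∈ s → h v ≤ s.foldl (fun m w => max (h w) m) c := by
  induction s with
  | nil => intro c v hv; cases hv
  | cons w t ih =>
    intro c v hv
    simp only [List.foldl_cons]
    rcases List.mem_cons.1 hv with rfl | hv
    · exact le_trans (le_max_left (h v) c) (seed_le_foldlmax h t _)
    · exact ih _ v hv

theorem foldlmax_le (h : Int → Int) (s : List Int) : ∀ c M : Int, c ≤ M → (∀ v ∈ s, h v ≤ M) → s.foldl (fun m v => max (h v) m) c ≤ M := by
  induction s with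
  | nil => intro c M hc _; exact hc
  | cons w t ih =>
    intro c M hc hv
    simp only [List.foldl_cons]
    exact ih _ M (max_le (hv w (by simp)) hc) (fun v hvt => hv v (by simp [hvt]))

-- Characterisation of Source B's binary search: it returns the partition point of '2*v ≤ L'
-- on a non-decreasing list, given that the property already holds left of a and fails from b on.
theorem bsearch_inv (L : Int) (s : List Int) (hmono : List.Pairwise (fun a b : Int => a ≤ b) s) :
    ∀ (N : ℕ) (a b : Int), (b - a).toNat ≤ N → 0 ≤ a → a ≤ b → b ≤ (s.length : Int) →
    (∀ i : ℕ, (hi : i < s.length) → (i : Int) < a → 2 * s[i] ≤ L) →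
    (∀ i : ℕ, (hi : i < s.length) → b ≤ (i : Int) → L < 2 * s[i]) →
    0 ≤ antBSearch L s a b ∧ antBSearch L s a b ≤ (s.length : Int) ∧
    (∀ i : ℕ, (hi : i < s.length) → (i : Int) < antBSearch L s a b → 2 * s[i] ≤ L) ∧
    (∀ i : ℕ, (hi : i < s.length) → antBSearch L s a b ≤ (i : Int) → L < 2 * s[i]) := by
  intro N
  induction N with
  | zero =>
    intro a b hN h0 h1 h2 hP1 hP2
    rw [antBSearch, dif_neg (by omega : ¬ a < b)]
    exact ⟨h0, by omega, hP1, fun i hi hle => hP2 i hi (by omega)⟩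
  | succ N ih =>
    intro a b hN h0 h1 h2 hP1 hP2
    rw [antBSearch]
    by_cases hab : a < b
    · rw [dif_pos hab]
      have hmdef : PySem.Int.floordiv (a + b) 2 = (a + b) / 2 := by
        simp [PySem.Int.floordiv, Int.fdiv_eq_ediv]
      rw [hmdef]
      have hmb : a ≤ (a + b) / 2 ∧ (a + b) / 2 < b := by omega
      have hmlen : ((a + b) / 2).toNat < s.length := by omega
      have hsm : PySem.List.pyGetD s ((a + b) / 2) 0 = s[((a + b) / 2).toNat] :=
        PySem.List.pyGetD_eq_getElem s 0 (by omega) (by omega)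
      rw [hsm]
      by_cases hc : 2 * s[((a + b) / 2).toNat] ≤ L
      · rw [if_pos hc]
        refine ih ((a + b) / 2 + 1) b (by omega) (by omega) (by omega) h2 ?_ hP2
        intro i hi hlt
        by_cases hia : (i : Int) < a
        · exact hP1 i hi hia
        · have hle : s[i] ≤ s[((a + b) / 2).toNat] := by
            rcases Nat.lt_or_ge i ((a + b) / 2).toNat with h | h
            · exact List.pairwise_iff_getElem.1 hmono i ((a + b) / 2).toNat hi hmlen h
            · have hEq : i = ((a + b) / 2).toNat := by omega
              subst hEq; exact le_refl _
          omega
      · rw [if_neg hc]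
        refine ih a ((a + b) / 2) (by omega) h0 (by omega) (by omega) hP1 ?_
        intro i hi hge
        by_cases hib : b ≤ (i : Int)
        · exact hP2 i hi hib
        · have hle : s[((a + b) / 2).toNat] ≤ s[i] := by
            rcases Nat.lt_or_ge ((a + b) / 2).toNat i with h | h
            · exact List.pairwise_iff_getElem.1 hmono ((a + b) / 2).toNat i hmlen hi h
            · have hEq : ((a + b) / 2).toNat = i := by omega
              subst hEq; exact le_refl _
          omega
    · rw [dif_neg hab]
      exact ⟨h0, by omega, hP1, fun i hi hle => hP2 i hi (by omega)⟩

-- Python's s[-1] on a non-empty list is the last element.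
theorem pyGetD_neg_one (s : List Int) (h : 0 < s.length) (d : Int) :
    PySem.List.pyGetD s (-1) d = s[s.length - 1]'(by omega) := by
  have hidx : PySem.List.pyIdx? s.length (-1) = some (s.length - 1) := by
    unfold PySem.List.pyIdx?
    rw [if_neg (by omega : ¬ (0 : Int) ≤ -1), if_pos (by omega : -(s.length : Int) ≤ -1)]
    norm_num
  simp [PySem.List.pyGetD, PySem.List.pyGet?, hidx,
        List.getElem?_eq_getElem (show s.length - 1 < s.length by omega)]

-- ant_alt on a positive n with non-empty slice, written without the let-chain.
theorem ant_alt_eval (L n : Int) (x : List Int) (h0 : 0 < n)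
    (s : List Int) (hseq : s = PySem.List.sorted (List.take n.toNat x) (fun v => v)) (hsne : s ≠ []) :
    ant_alt L n x =
      (max 0 (max (PySem.List.pyGetD s (-1) 0) (L - PySem.List.pyGetD s 0 0)),
       if antBSearch L s 0 (PySem.List.len s) < PySem.List.len s then
         max (if antBSearch L s 0 (PySem.List.len s) > 0 then
                max 0 (PySem.List.pyGetD s (antBSearch L s 0 (PySem.List.len s) - 1) 0) else 0)
             (L - PySem.List.pyGetD s (antBSearch L s 0 (PySem.List.len s)) 0)
       else
         (if antBSearch L s 0 (PySem.List.len s) > 0 then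
            max 0 (PySem.List.pyGetD s (antBSearch L s 0 (PySem.List.len s) - 1) 0) else 0)) := by
  have hcond : (if n > 0 then PySem.List.sorted (PySem.List.slice x none (some n)) (fun v => v) else []) = s := by
    rw [if_pos h0, PySem.List.slice_to x (le_of_lt h0), ← hseq]
  simp only [ant_alt, hcond, if_neg hsne]

-- ===== VERDICT (by name: the statement is the Claim_ definition above) =====
theorem ant_spec : Claim_equal_ant := by
  intro L n x _ hpre
  unfold Spec_ant
  by_cases h0 : 0 < n
  · obtain ⟨xs, hxs⟩ : ∃ xs, xs = List.take n.toNat x := ⟨_, rfl⟩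
    obtain ⟨s, hs⟩ : ∃ s, s = PySem.List.sorted xs (fun v => v) := ⟨_, rfl⟩
    have hxslen : xs.length = n.toNat := by
      rw [hxs]; simp [List.length_take]
      have : n ≤ (x.length : Int) := hpre
      omega
    have hslen : s.length = n.toNat := by rw [hs, PySem.List.length_sorted]; exact hxslen
    have hlen0 : 0 < s.length := by omega
    have hsne : s ≠ [] := by
      intro hnil
      rw [hnil] at hlen0
      simp at hlen0
    have hmono : List.Pairwise (fun a b : Int => a ≤ b) s := by
      rw [hs]; simpa using PySem.List.sorted_pairwise xs (fun v => v)
    have hmem : ∀ v : Int, v ∈ s ↔ v ∈ xs := by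
      intro v; rw [hs]; exact PySem.List.mem_sorted xs _ false v
    have hgetmono : ∀ (p q : ℕ) (hq : q < s.length) (_hpq : p ≤ q), s[p]'(by omega) ≤ s[q]'hq := by
      intro p q hq hpq
      rcases Nat.lt_or_ge p q with h | h
      · exact List.pairwise_iff_getElem.1 hmono p q (by omega) hq h
      · have hEq : p = q := by omega
        subst hEq; exact le_refl _
    rw [ant_eq_fold L n x h0 hpre, ← hxs, loopA_split,
        ant_alt_eval L n x h0 s (by rw [hs, hxs]) hsne,
        PySem.List.len_eq s]
    obtain ⟨hq0, hqlen, hq1, hq2⟩ :=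
      bsearch_inv L s hmono s.length 0 (s.length : Int) (by omega) (by omega) (by omega) (by omega)
        (fun i hi hlt => absurd hlt (by omega))
        (fun i hi hge => absurd hge (by omega))
    simp only [Prod.mk.injEq]
    constructor
    · -- farthest distance: fold of max(v, L-v) equals max(0, s[-1], L - s[0])
      rw [pyGetD_neg_one s hlen0 0]
      have hget0 : PySem.List.pyGetD s 0 0 = s[0]'hlen0 := by
        have h := PySem.List.pyGetD_eq_getElem s (i := 0) 0 (by omega) (by omega)
        simpa using h
      rw [hget0]
      apply le_antisymm
      · refine foldlmax_le _ xs 0 _ (by omega) ?_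
        intro v hv
        obtain ⟨i, hi, rfl⟩ := List.mem_iff_getElem.1 ((hmem _).mpr hv)
        have h1 := hgetmono i (s.length - 1) (by omega) (by omega)
        have h2 := hgetmono 0 i hi (by omega)
        omega
      · have h1 := mem_le_foldlmax (fun v => max v (L - v)) xs 0 (s[s.length - 1]'(by omega))
          ((hmem _).mp (List.getElem_mem _))
        have h2 := mem_le_foldlmax (fun v => max v (L - v)) xs 0 (s[0]'hlen0)
          ((hmem _).mp (List.getElem_mem _))
        have h3 := seed_le_foldlmax (fun v => max v (L - v)) xs 0
        simp only at h1 h2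
        omega
    · -- nearest distance: fold of min(v, L-v) equals the binary-search read-off
      by_cases hql : antBSearch L s 0 (s.length : Int) < (s.length : Int)
      · rw [if_pos hql]
        have hgq : PySem.List.pyGetD s (antBSearch L s 0 (s.length : Int)) 0
            = s[(antBSearch L s 0 (s.length : Int)).toNat]'(by omega) :=
          PySem.List.pyGetD_eq_getElem s 0 hq0 hql
        rw [hgq]
        by_cases hqpos : antBSearch L s 0 (s.length : Int) > 0
        · rw [if_pos hqpos]
          have hgq1 : PySem.List.pyGetD s (antBSearch L s 0 (s.length : Int) - 1) 0
              = s[(antBSearch L s 0 (s.length : Int) - 1).toNat]'(by omega) :=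
            PySem.List.pyGetD_eq_getElem s 0 (by omega) (by omega)
          rw [hgq1]
          apply le_antisymm
          · refine foldlmax_le _ xs 0 _ (by omega) ?_
            intro v hv
            obtain ⟨i, hi, rfl⟩ := List.mem_iff_getElem.1 ((hmem _).mpr hv)
            by_cases hiq : (i : Int) < antBSearch L s 0 (s.length : Int)
            · have h1 := hq1 i hi hiq
              have h2 := hgetmono i (antBSearch L s 0 (s.length : Int) - 1).toNat (by omega) (by omega)
              omega
            · have h1 := hq2 i hi (by omega)
              have h2 := hgetmono (antBSearch L s 0 (s.length : Int)).toNat i hi (by omega)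
              omega
          · have h1 := mem_le_foldlmax (fun v => min v (L - v)) xs 0
              (s[(antBSearch L s 0 (s.length : Int) - 1).toNat]'(by omega))
              ((hmem _).mp (List.getElem_mem _))
            have h2 := mem_le_foldlmax (fun v => min v (L - v)) xs 0
              (s[(antBSearch L s 0 (s.length : Int)).toNat]'(by omega))
              ((hmem _).mp (List.getElem_mem _))
            have h3 := seed_le_foldlmax (fun v => min v (L - v)) xs 0
            have h4 := hq1 (antBSearch L s 0 (s.length : Int) - 1).toNat (by omega) (by omega)
            have h5 := hq2 (antBSearch L s 0 (s.length : Int)).toNat (by omega) (by omega)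
            simp only at h1 h2
            omega
        · rw [if_neg hqpos]
          apply le_antisymm
          · refine foldlmax_le _ xs 0 _ (by omega) ?_
            intro v hv
            obtain ⟨i, hi, rfl⟩ := List.mem_iff_getElem.1 ((hmem _).mpr hv)
            have h1 := hq2 i hi (by omega)
            have h2 := hgetmono (antBSearch L s 0 (s.length : Int)).toNat i hi (by omega)
            omega
          · have h2 := mem_le_foldlmax (fun v => min v (L - v)) xs 0
              (s[(antBSearch L s 0 (s.length : Int)).toNat]'(by omega))
              ((hmem _).mp (List.getElem_mem _))
            have h3 := seed_le_foldlmax (fun v => min v (L - v)) xs 0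
            have h5 := hq2 (antBSearch L s 0 (s.length : Int)).toNat (by omega) (by omega)
            simp only at h2
            omega
      · rw [if_neg hql]
        have hqpos : antBSearch L s 0 (s.length : Int) > 0 := by omega
        rw [if_pos hqpos]
        have hgq1 : PySem.List.pyGetD s (antBSearch L s 0 (s.length : Int) - 1) 0
            = s[(antBSearch L s 0 (s.length : Int) - 1).toNat]'(by omega) :=
          PySem.List.pyGetD_eq_getElem s 0 (by omega) (by omega)
        rw [hgq1]
        apply le_antisymm
        · refine foldlmax_le _ xs 0 _ (by omega) ?_
          intro v hv
          obtain ⟨i, hi, rfl⟩ := List.mem_iff_getElem.1 ((hmem _).mpr hv)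
          have h1 := hq1 i hi (by omega)
          have h2 := hgetmono i (antBSearch L s 0 (s.length : Int) - 1).toNat (by omega) (by omega)
          omega
        · have h1 := mem_le_foldlmax (fun v => min v (L - v)) xs 0
            (s[(antBSearch L s 0 (s.length : Int) - 1).toNat]'(by omega))
            ((hmem _).mp (List.getElem_mem _))
          have h3 := seed_le_foldlmax (fun v => min v (L - v)) xs 0
          have h4 := hq1 (antBSearch L s 0 (s.length : Int) - 1).toNat (by omega) (by omega)
          simp only at h1
          omega
  · have hr : PySem.List.pyRange 0 n 1 = [] := PySem.List.pyRange_one_eq_nil (by omega)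
    simp [ant, ant_alt, hr, h0]
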